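-- pv_equiv track=rewrite | github.com/korengaus/policy_ai | pipeline_debug.py | _evidence_strength_summary
-- ===== SOURCE A (Python) =====
-- def _evidence_strength_summary(evidence_snippets: list[dict]) -> dict:
--     snippets = evidence_snippets or []
--     return {
--         "strong": sum(1 for item in snippets if item.get("evidence_strength") == "strong"),
--         "medium": sum(1 for item in snippets if item.get("evidence_strength") == "medium"),
--         "weak": sum(1 for item in snippets if item.get("evidence_strength") == "weak"),
--         "none": sum(1 for item in snippets if item.get("evidence_strength") in {"none", None}),
--     }
-- ===== SOURCE B (Python) =====
-- def _evidence_strength_summary(evidence_snippets: list[dict]) -> dict: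
--     strong = medium = weak = none = 0
--     for item in (evidence_snippets or []):
--         s = item.get("evidence_strength")
--         if s == "strong":
--             strong += 1
--         elif s == "medium":
--             medium += 1
--         elif s == "weak":
--             weak += 1
--         elif s == "none" or s is None:
--             none += 1
--     return {"strong": strong, "medium": medium, "weak": weak, "none": none}
-- ===== Notes on version B (the rewrite author's own statement) =====
-- stated objective: simpler
-- what changed: replaces four independent generator-expression scans of the snippet list with one loop that maintains four running counters
import Mathlib
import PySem

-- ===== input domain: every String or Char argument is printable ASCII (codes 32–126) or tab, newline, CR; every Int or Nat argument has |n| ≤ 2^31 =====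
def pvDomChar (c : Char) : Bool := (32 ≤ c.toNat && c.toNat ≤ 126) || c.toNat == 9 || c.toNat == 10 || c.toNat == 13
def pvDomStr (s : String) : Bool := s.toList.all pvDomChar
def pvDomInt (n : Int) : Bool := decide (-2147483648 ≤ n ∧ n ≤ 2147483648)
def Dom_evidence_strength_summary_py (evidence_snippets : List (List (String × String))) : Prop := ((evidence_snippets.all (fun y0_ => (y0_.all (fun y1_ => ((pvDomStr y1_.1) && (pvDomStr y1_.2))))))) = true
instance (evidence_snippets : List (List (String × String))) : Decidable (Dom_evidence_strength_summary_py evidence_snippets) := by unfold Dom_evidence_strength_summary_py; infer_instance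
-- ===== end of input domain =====

-- B replaces A's four separate scans of the snippet list with one loop keeping four running counters (simpler, single pass).


-- item.get("evidence_strength"): Python dict built from the pairs (later duplicates overwrite), then .get
def pvGetStrength (item : List (String × String)) : Option String :=
  (PySem.Dict.ofList item).get? "evidence_strength"

-- ===== PORT A =====
-- each sum(1 for item in snippets if <cond>) is a foldl adding 1 when <cond> holds
def evidence_strength_summary_py (evidence_snippets : List (List (String × String))) : List (String × Int) :=
  let snippets := evidence_snippets
  [("strong", snippets.foldl (fun acc item => if pvGetStrength item = some "strong" then acc + 1 else acc) 0),
   ("medium", snippets.foldl (fun acc item => if pvGetStrength item = some "medium" then acc + 1 else acc) 0),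
   ("weak",   snippets.foldl (fun acc item => if pvGetStrength item = some "weak" then acc + 1 else acc) 0),
   ("none",   snippets.foldl (fun acc item => if pvGetStrength item = some "none" ∨ pvGetStrength item = none then acc + 1 else acc) 0)]

-- ===== PORT B =====
-- one pass, four running counters (strong, medium, weak, none)
def pvBStep (st : Int × Int × Int × Int) (item : List (String × String)) : Int × Int × Int × Int :=
  match pvGetStrength item with
  | some "strong" => (st.1 + 1, st.2.1, st.2.2.1, st.2.2.2)
  | some "medium" => (st.1, st.2.1 + 1, st.2.2.1, st.2.2.2)
  | some "weak"   => (st.1, st.2.1, st.2.2.1 + 1, st.2.2.2)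
  | some "none"   => (st.1, st.2.1, st.2.2.1, st.2.2.2 + 1)
  | none          => (st.1, st.2.1, st.2.2.1, st.2.2.2 + 1)
  | some _        => st

def evidence_strength_summary_py_alt (evidence_snippets : List (List (String × String))) : List (String × Int) :=
  let st := evidence_snippets.foldl pvBStep (0, 0, 0, 0)
  [("strong", st.1), ("medium", st.2.1), ("weak", st.2.2.1), ("none", st.2.2.2)]

-- ===== PRECONDITION & SPEC =====
def Spec_evidence_strength_summary_py (evidence_snippets : List (List (String × String))) (out : List (String × Int)) : Prop := out = evidence_strength_summary_py_alt evidence_snippets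
instance (evidence_snippets : List (List (String × String))) (out : List (String × Int)) : Decidable (Spec_evidence_strength_summary_py evidence_snippets out) := by unfold Spec_evidence_strength_summary_py; infer_instance

-- ===== CLAIM (what is proved, stated in full; the proofs are below) =====
def Claim_equal_evidence_strength_summary_py : Prop := ∀ (evidence_snippets : List (List (String × String))), Dom_evidence_strength_summary_py evidence_snippets → Spec_evidence_strength_summary_py evidence_snippets (evidence_strength_summary_py evidence_snippets)

-- ===== LEMMAS AND PROOFS =====

def pvCnt (p : List (String × String) → Prop) [DecidablePred p]
    (l : List (List (String × String))) : Int :=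
  l.foldl (fun acc item => if p item then acc + 1 else acc) 0

theorem pvCnt_init (p : List (String × String) → Prop) [DecidablePred p]
    (l : List (List (String × String))) (a : Int) :
    l.foldl (fun acc item => if p item then acc + 1 else acc) a = a + pvCnt p l := by
  induction l generalizing a with
  | nil => simp [pvCnt]
  | cons x xs ih =>
    simp only [pvCnt, List.foldl_cons]
    rw [ih, ih ((if p x then (0:Int) + 1 else 0))]
    split <;> omega

theorem pvCnt_cons (p : List (String × String) → Prop) [DecidablePred p]
    (x : List (String × String)) (xs : List (List (String × String))) :
    pvCnt p (x :: xs) = (if p x then 1 else 0) + pvCnt p xs := by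
  show List.foldl _ _ _ = _
  rw [List.foldl_cons, pvCnt_init]
  split <;> omega

theorem pvBStep_fold (l : List (List (String × String))) (s m w n : Int) :
    l.foldl pvBStep (s, m, w, n) =
      (s + pvCnt (fun i => pvGetStrength i = some "strong") l,
       m + pvCnt (fun i => pvGetStrength i = some "medium") l,
       w + pvCnt (fun i => pvGetStrength i = some "weak") l,
       n + pvCnt (fun i => pvGetStrength i = some "none" ∨ pvGetStrength i = none) l) := by
  induction l generalizing s m w n with
  | nil => simp [pvCnt]
  | cons x xs ih =>
    simp only [List.foldl_cons, pvCnt_cons]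
    rw [show xs.foldl pvBStep (pvBStep (s, m, w, n) x) = _ from ih _ _ _ _]
    rcases h : pvGetStrength x with _ | v
    · simp; omega
    · by_cases h1 : v = "strong"
      · subst h1; simp; omega
      · by_cases h2 : v = "medium"
        · subst h2; simp [h1]; omega
        · by_cases h3 : v = "weak"
          · subst h3; simp [h1, h2]; omega
          · by_cases h4 : v = "none"
            · subst h4; simp [h1, h2, h3]; omega
            · simp [h1, h2, h3, h4]

-- ===== VERDICT (by name: the statement is the Claim_ definition above) =====
theorem evidence_strength_summary_py_spec : Claim_equal_evidence_strength_summary_py := by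
  intro es _
  unfold Spec_evidence_strength_summary_py evidence_strength_summary_py evidence_strength_summary_py_alt
  rw [pvBStep_fold]
  simp only [pvCnt, zero_add]
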